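-- pv_equiv track=rewrite | github.com/kirbush/telegram_cloud_rag_bot | app/services/notebooklm_client.py | _is_allowed_google_cookie_domain
-- ===== SOURCE A (Python) =====
-- _ALLOWED_COOKIE_DOMAIN_ROOTS = (
--     "google.com",
--     "googleusercontent.com",
--     "usercontent.google.com",
-- )
--
-- def _normalize_cookie_domain(domain: str) -> str:
--     return str(domain or "").strip().lstrip(".").lower()
--
-- def _is_allowed_google_cookie_domain(domain: str) -> bool:
--     normalized = _normalize_cookie_domain(domain)
--     if not normalized:
--         return False
--     return any(
--         normalized == root or normalized.endswith(f".{root}")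
--         for root in _ALLOWED_COOKIE_DOMAIN_ROOTS
--     )
-- ===== SOURCE B (Python) =====
-- _ALLOWED_COOKIE_DOMAIN_ROOTS = (
--     "google.com",
--     "googleusercontent.com",
--     "usercontent.google.com",
-- )
--
-- def _is_allowed_google_cookie_domain(domain: str) -> bool:
--     suffix = str(domain or "").strip().lstrip(".").lower()
--     allowed = set(_ALLOWED_COOKIE_DOMAIN_ROOTS)
--     while suffix:
--         if suffix in allowed:
--             return True
--         dot = suffix.find(".")
--         if dot == -1:
--             return False
--         suffix = suffix[dot + 1:]
--     return False
-- ===== Notes on version B (the rewrite author's own statement) =====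
-- stated objective: alternative
-- what changed: Instead of testing each allowed root with == / endswith, B peels the normalized domain one dot-delimited label at a time and checks each resulting suffix for membership in a set of the allowed roots.
import Mathlib
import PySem

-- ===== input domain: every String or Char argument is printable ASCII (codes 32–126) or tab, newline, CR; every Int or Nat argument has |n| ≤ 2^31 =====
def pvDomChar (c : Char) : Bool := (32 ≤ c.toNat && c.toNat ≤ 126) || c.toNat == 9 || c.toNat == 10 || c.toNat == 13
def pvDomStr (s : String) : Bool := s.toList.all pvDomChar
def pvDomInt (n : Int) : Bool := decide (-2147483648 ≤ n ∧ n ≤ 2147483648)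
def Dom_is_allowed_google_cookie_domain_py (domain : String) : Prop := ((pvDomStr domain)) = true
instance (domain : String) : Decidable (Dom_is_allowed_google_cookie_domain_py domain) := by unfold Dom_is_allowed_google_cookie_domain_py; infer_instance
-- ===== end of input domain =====

-- B replaces A's loop over the fixed allowed roots (== / endswith per root) with a single walk
-- down the domain's dot-delimited suffixes, testing each against a set of the roots (alternative
-- decomposition, same cost).

-- ===== PORT A =====
-- shared normalization helper: str(domain or "").strip().lstrip(".").lower()
-- (.lstrip(".") is ported by hand as dropWhile on the single strip character — exact;
--  'domain or ""' is the identity on strings)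
def pvNormalize (domain : String) : List Char :=
  PySem.Chars.lower (((PySem.Str.strip domain).toList).dropWhile (fun c => c == '.'))

def pvRoots : List String :=
  ["google.com", "googleusercontent.com", "usercontent.google.com"]

def is_allowed_google_cookie_domain_py (domain : String) : Bool :=
  let normalized := pvNormalize domain
  if normalized = [] then false
  else pvRoots.any (fun root =>
    normalized == root.toList || PySem.Chars.endswith normalized ('.' :: root.toList))

-- ===== PORT B =====
-- the while loop of B: peel one dot-delimited label per step, testing set membership
def pvPeel (allowed : PySem.Set (List Char)) (suffix : List Char) : Bool :=
  if suffix = [] then false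
  else if PySem.Set.contains allowed suffix then true
  else
    let dot := PySem.Chars.find suffix ['.']
    if h : dot = -1 then false
    else pvPeel allowed (PySem.Chars.slice suffix (some (dot + 1)) none)
termination_by suffix.length
decreasing_by
  have h1 : -1 ≤ PySem.Chars.find suffix ['.'] := PySem.Chars.neg_one_le_find suffix ['.']
  have h0 : 0 ≤ PySem.Chars.find suffix ['.'] := by omega
  simp only [PySem.Chars.slice_eq_listSlice]
  rw [PySem.List.slice_from suffix (show (0:Int) ≤ PySem.Chars.find suffix ['.'] + 1 by omega)]
  have hne : suffix ≠ [] := by assumption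
  have hp : 0 < suffix.length := List.length_pos_iff.mpr hne
  simp [List.length_drop]
  omega

def is_allowed_google_cookie_domain_py_alt (domain : String) : Bool :=
  pvPeel (PySem.Set.ofList (pvRoots.map String.toList)) (pvNormalize domain)

-- ===== PRECONDITION & SPEC =====
def Spec_is_allowed_google_cookie_domain_py (domain : String) (out : Bool) : Prop := out = is_allowed_google_cookie_domain_py_alt domain
instance (domain : String) (out : Bool) : Decidable (Spec_is_allowed_google_cookie_domain_py domain out) := by unfold Spec_is_allowed_google_cookie_domain_py; infer_instance

-- ===== CLAIM (what is proved, stated in full; the proofs are below) =====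
def Claim_equal_is_allowed_google_cookie_domain_py : Prop := ∀ (domain : String), Dom_is_allowed_google_cookie_domain_py domain → Spec_is_allowed_google_cookie_domain_py domain (is_allowed_google_cookie_domain_py domain)

-- ===== LEMMAS AND PROOFS =====

theorem pvPeel_drop_iff (s : List Char) (n : Nat)
    (hdot : s.drop n = '.' :: s.drop (n+1))
    (hmin : ∀ i : Nat, i < n → ¬ ['.'] <+: s.drop i) (r : List Char) :
    ('.' :: r) <:+ s ↔ r = s.drop (n+1) ∨ ('.' :: r) <:+ s.drop (n+1) := by
  constructor
  · rintro ⟨t, ht⟩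
    have hdropj : s.drop t.length = '.' :: r := by
      rw [← ht, List.drop_left]
    have hj : n ≤ t.length := by
      by_contra hlt
      exact hmin t.length (by omega) (by rw [hdropj]; exact ⟨r, rfl⟩)
    rcases Nat.eq_or_lt_of_le hj with heq | hlt
    · left
      rw [← heq, hdot] at hdropj
      exact (List.cons.injEq _ _ _ _ ▸ hdropj).2.symm
    · right
      have : s.drop t.length = (s.drop (n+1)).drop (t.length - (n+1)) := by
        rw [List.drop_drop]
        congr 1
        omega
      rw [this] at hdropj
      rw [← hdropj]
      exact List.drop_suffix _ _
  · rintro (rfl | hsuf)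
    · have : '.' :: s.drop (n+1) <:+ s := by
        rw [← hdot]; exact List.drop_suffix _ _
      exact this
    · exact hsuf.trans (List.drop_suffix _ _)

theorem pvPeel_iff (allowed : PySem.Set (List Char)) (h0 : [] ∉ allowed) :
    ∀ (s : List Char),
    pvPeel allowed s = true ↔ s ∈ allowed ∨ ∃ r ∈ allowed, ('.' :: r) <:+ s := by
  intro s
  induction s using pvPeel.induct allowed with
  | case1 =>
    rw [pvPeel]
    simp only [if_true, Bool.false_eq_true, false_iff]
    rintro (h | ⟨r, _, hsuf⟩)
    · exact h0 h
    · exact List.cons_ne_nil _ _ (List.suffix_nil.mp hsuf)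
  | case2 s hne hc =>
    rw [pvPeel]
    simp only [if_neg hne, if_pos hc, true_iff]
    exact Or.inl ((PySem.Set.contains_iff allowed s).mp hc)
  | case3 s hne hc dotv hfind =>
    have hfind' : PySem.Chars.find s ['.'] = -1 := hfind
    rw [pvPeel]
    simp only [if_neg hne, if_neg hc, dif_pos hfind', Bool.false_eq_true, false_iff]
    rintro (h | ⟨r, hr, ⟨t, ht⟩⟩)
    · exact hc ((PySem.Set.contains_iff allowed s).mpr h)
    · exact ((PySem.Chars.find_eq_neg_one_iff s ['.']).mp hfind') ⟨t, r, by simpa using ht⟩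
  | case4 s hne hc dotv hfind ih =>
    have hfind' : PySem.Chars.find s ['.'] ≠ -1 := hfind
    have hle : -1 ≤ PySem.Chars.find s ['.'] := PySem.Chars.neg_one_le_find s ['.']
    have hnn : 0 ≤ PySem.Chars.find s ['.'] := by
      rcases lt_or_eq_of_le hle with h | h
      · omega
      · exact absurd h.symm hfind'
    set n := (PySem.Chars.find s ['.']).toNat with hn
    have hslice : PySem.Chars.slice s (some (PySem.Chars.find s ['.'] + 1)) none
        = s.drop (n+1) := by
      simp only [PySem.Chars.slice_eq_listSlice]
      rw [PySem.List.slice_from s (show (0:Int) ≤ PySem.Chars.find s ['.'] + 1 by omega)]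
      congr 1
      omega
    have hspec := PySem.Chars.findFrom_natCast_spec s ['.'] 0 (Nat.zero_le _)
    rw [Nat.cast_zero, PySem.Chars.findFrom_zero] at hspec
    obtain ⟨-, hpre, hmin⟩ := hspec hfind'
    have hdot : s.drop n = '.' :: s.drop (n+1) := by
      obtain ⟨t, ht⟩ := hpre
      have htail : (s.drop n).tail = s.drop (n+1) := by
        rw [List.tail_drop]
      rw [← ht] at htail ⊢
      simp at htail
      simp [htail]
    have hmin' : ∀ i : Nat, i < n → ¬ ['.'] <+: s.drop i :=
      fun i hi => hmin i (Nat.zero_le _) hi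
    have hdv : dotv = PySem.Chars.find s ['.'] := rfl
    rw [hdv, hslice] at ih
    rw [pvPeel]
    simp only [if_neg hne, if_neg hc, dif_neg hfind']
    rw [hslice, ih]
    have hsmem : s ∉ allowed := fun h => hc ((PySem.Set.contains_iff allowed s).mpr h)
    constructor
    · rintro (h | ⟨r, hr, hsuf⟩)
      · exact Or.inr ⟨s.drop (n+1), h,
          (pvPeel_drop_iff s n hdot hmin' _).mpr (Or.inl rfl)⟩
      · exact Or.inr ⟨r, hr, (pvPeel_drop_iff s n hdot hmin' r).mpr (Or.inr hsuf)⟩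
    · rintro (h | ⟨r, hr, hsuf⟩)
      · exact absurd h hsmem
      · rcases (pvPeel_drop_iff s n hdot hmin' r).mp hsuf with heq | hsuf'
        · exact Or.inl (heq ▸ hr)
        · exact Or.inr ⟨r, hr, hsuf'⟩

-- ===== VERDICT (by name: the statement is the Claim_ definition above) =====
theorem is_allowed_google_cookie_domain_py_spec : Claim_equal_is_allowed_google_cookie_domain_py := by
  intro domain _
  unfold Spec_is_allowed_google_cookie_domain_py
  unfold is_allowed_google_cookie_domain_py is_allowed_google_cookie_domain_py_alt
  have h0 : ([] : List Char) ∉ PySem.Set.ofList (pvRoots.map String.toList) := by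
    rw [PySem.Set.mem_ofList]
    decide
  rw [Bool.eq_iff_iff, pvPeel_iff _ h0]
  by_cases hN : pvNormalize domain = []
  · simp only [hN, if_true, Bool.false_eq_true, false_iff]
    rintro (h | ⟨r, _, hsuf⟩)
    · exact h0 h
    · exact List.cons_ne_nil _ _ (List.suffix_nil.mp hsuf)
  · simp only [if_neg hN]
    simp only [List.any_eq_true, Bool.or_eq_true, beq_iff_eq,
      PySem.Chars.endswith_iff, PySem.Set.mem_ofList, List.mem_map]
    constructor
    · rintro ⟨root, hroot, h | h⟩
      · exact Or.inl ⟨root, hroot, h.symm⟩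
      · exact Or.inr ⟨root.toList, ⟨root, hroot, rfl⟩, h⟩
    · rintro (⟨root, hroot, h⟩ | ⟨r, ⟨root, hroot, rfl⟩, h⟩)
      · exact ⟨root, hroot, Or.inl h.symm⟩
      · exact ⟨root, hroot, Or.inr h⟩
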